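-- pv_equiv track=rewrite | github.com/YourBr0ther/EeveeLLM | brain_council/decision.py | _decisions_agree
-- ===== SOURCE A (Python) =====
-- def _decisions_agree(decision1: str, decision2: str) -> bool:
--     """Check if two decisions are in agreement"""
--     # Normalize decisions
--     d1 = decision1.lower()
--     d2 = decision2.lower()
--
--     # Agreement groups
--     positive_decisions = ['agree', 'yes', 'enthusiastic', 'excited', 'joyful', 'accept']
--     negative_decisions = ['disagree', 'no', 'protest', 'fear', 'too_']
--     caution_decisions = ['cautious', 'careful', 'maybe', 'consider']
--
--     # Check if both in same group
--     if any(term in d1 for term in positive_decisions) and any(term in d2 for term in positive_decisions):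
--         return True
--     if any(term in d1 for term in negative_decisions) and any(term in d2 for term in negative_decisions):
--         return True
--     if any(term in d1 for term in caution_decisions) and any(term in d2 for term in caution_decisions):
--         return True
--
--     return False
-- ===== SOURCE B (Python) =====
-- # One left-to-right scan per string over all 15 anchored terms, accumulating a
-- # 3-bit group mask; agreement = nonzero bitwise AND of the two masks.
-- _TERMS = [
--     ('agree', 1), ('yes', 1), ('enthusiastic', 1), ('excited', 1),
--     ('joyful', 1), ('accept', 1),
--     ('disagree', 2), ('no', 2), ('protest', 2), ('fear', 2), ('too_', 2),
--     ('cautious', 4), ('careful', 4), ('maybe', 4), ('consider', 4),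
-- ]
--
--
-- def _group_mask(decision):
--     d = decision.lower()
--     mask = 0
--     for i in range(len(d)):
--         for term, bit in _TERMS:
--             if d.startswith(term, i):
--                 mask |= bit
--     return mask
--
--
-- def _decisions_agree(decision1: str, decision2: str) -> bool:
--     """Check if two decisions are in agreement"""
--     return (_group_mask(decision1) & _group_mask(decision2)) != 0
-- ===== Notes on version B (the rewrite author's own statement) =====
-- stated objective: alternative
-- what changed: B replaces A's three sequential per-term substring ('in') group checks with a single left-to-right scan of each string that tests which of the 15 terms start at each position, accumulating a 3-bit group bitmask per decision, and decides agreement by a nonzero bitwise AND of the two masks.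
import Mathlib
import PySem

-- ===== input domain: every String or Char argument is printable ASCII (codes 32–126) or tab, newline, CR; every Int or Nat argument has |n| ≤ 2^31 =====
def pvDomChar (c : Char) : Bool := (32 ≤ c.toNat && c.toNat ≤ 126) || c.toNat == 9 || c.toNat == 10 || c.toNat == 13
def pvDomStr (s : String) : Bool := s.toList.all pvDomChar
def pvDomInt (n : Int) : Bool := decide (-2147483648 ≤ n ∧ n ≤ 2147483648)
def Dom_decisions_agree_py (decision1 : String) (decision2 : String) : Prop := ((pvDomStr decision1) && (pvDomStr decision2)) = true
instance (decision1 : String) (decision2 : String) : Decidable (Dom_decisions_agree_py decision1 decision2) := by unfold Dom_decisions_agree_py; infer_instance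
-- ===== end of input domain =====

-- B replaces A's three sequential per-term substring checks with one left-to-right
-- scan per string testing which terms start at each position, accumulating a 3-bit
-- group mask, and intersects the two masks bitwise (objective: alternative).

-- ===== PORT A =====
def decisions_agree_py (decision1 : String) (decision2 : String) : Bool :=
  let d1 := PySem.Str.lower decision1
  let d2 := PySem.Str.lower decision2
  let positive_decisions := ["agree", "yes", "enthusiastic", "excited", "joyful", "accept"]
  let negative_decisions := ["disagree", "no", "protest", "fear", "too_"]
  let caution_decisions := ["cautious", "careful", "maybe", "consider"]
  if (positive_decisions.any (fun term => PySem.Str.isIn term d1)) &&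
     (positive_decisions.any (fun term => PySem.Str.isIn term d2)) then true
  else if (negative_decisions.any (fun term => PySem.Str.isIn term d1)) &&
          (negative_decisions.any (fun term => PySem.Str.isIn term d2)) then true
  else if (caution_decisions.any (fun term => PySem.Str.isIn term d1)) &&
          (caution_decisions.any (fun term => PySem.Str.isIn term d2)) then true
  else false

-- ===== PORT B =====
-- Source B's _TERMS table: (term, group bit)
def pvTerms : List (List Char × Nat) :=
  [("agree".toList, 1), ("yes".toList, 1), ("enthusiastic".toList, 1), ("excited".toList, 1),
   ("joyful".toList, 1), ("accept".toList, 1),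
   ("disagree".toList, 2), ("no".toList, 2), ("protest".toList, 2), ("fear".toList, 2), ("too_".toList, 2),
   ("cautious".toList, 4), ("careful".toList, 4), ("maybe".toList, 4), ("consider".toList, 4)]

-- Source B's _group_mask: for each position i of d, OR in the bit of every term that
-- starts at i (d.startswith(term, i) ported exactly as "term is a prefix of d.drop i")
def pvGroupMask (decision : String) : Nat :=
  let d := (PySem.Str.lower decision).toList
  (List.range d.length).foldl
    (fun mask i =>
      pvTerms.foldl (fun m t => if PySem.Chars.startswith (d.drop i) t.1 then m ||| t.2 else m) mask) 0

def decisions_agree_py_alt (decision1 : String) (decision2 : String) : Bool :=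
  (pvGroupMask decision1 &&& pvGroupMask decision2) != 0

-- ===== PRECONDITION & SPEC =====
def Spec_decisions_agree_py (decision1 : String) (decision2 : String) (out : Bool) : Prop := out = decisions_agree_py_alt decision1 decision2
instance (decision1 : String) (decision2 : String) (out : Bool) : Decidable (Spec_decisions_agree_py decision1 decision2 out) := by unfold Spec_decisions_agree_py; infer_instance

-- ===== CLAIM (what is proved, stated in full; the proofs are below) =====
def Claim_equal_decisions_agree_py : Prop := ∀ (decision1 : String) (decision2 : String), Dom_decisions_agree_py decision1 decision2 → Spec_decisions_agree_py decision1 decision2 (decisions_agree_py decision1 decision2)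

-- ===== LEMMAS AND PROOFS =====

-- groupwise "any term is a substring of s" predicates (A's three any() checks, on chars)
def pvP (s : List Char) : Bool := ["agree", "yes", "enthusiastic", "excited", "joyful", "accept"].any (fun t => PySem.Chars.isIn t.toList s)
def pvN (s : List Char) : Bool := ["disagree", "no", "protest", "fear", "too_"].any (fun t => PySem.Chars.isIn t.toList s)
def pvC (s : List Char) : Bool := ["cautious", "careful", "maybe", "consider"].any (fun t => PySem.Chars.isIn t.toList s)

-- "some term of the group starts at the head of s"
def pvPs (s : List Char) : Bool := ["agree", "yes", "enthusiastic", "excited", "joyful", "accept"].any (fun t => PySem.Chars.startswith s t.toList)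
def pvNs (s : List Char) : Bool := ["disagree", "no", "protest", "fear", "too_"].any (fun t => PySem.Chars.startswith s t.toList)
def pvCs (s : List Char) : Bool := ["cautious", "careful", "maybe", "consider"].any (fun t => PySem.Chars.startswith s t.toList)

-- the mask the scan computes, expressed through the three substring predicates
def pvG (s : List Char) : Nat :=
  (if pvP s then 1 else 0) ||| (if pvN s then 2 else 0) ||| (if pvC s then 4 else 0)

theorem pv_isIn_cons (t : List Char) (c : Char) (rest : List Char) :
    PySem.Chars.isIn t (c :: rest) =
      (PySem.Chars.startswith (c :: rest) t || PySem.Chars.isIn t rest) := by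
  rcases h : (PySem.Chars.startswith (c :: rest) t || PySem.Chars.isIn t rest) with _ | _
  · simp only [Bool.or_eq_false_iff] at h
    rw [PySem.Chars.isIn_eq_false_iff]
    intro hin
    rcases (List.infix_cons_iff).1 hin with hp | hi
    · exact absurd ((PySem.Chars.startswith_iff _ _).2 hp) (by simp [h.1])
    · exact absurd ((PySem.Chars.isIn_iff_infix _ _).2 hi) (by simp [h.2])
  · rw [PySem.Chars.isIn_iff_infix, List.infix_cons_iff]
    rcases Bool.or_eq_true_iff.1 h with hp | hi
    · exact Or.inl ((PySem.Chars.startswith_iff _ _).1 hp)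
    · exact Or.inr ((PySem.Chars.isIn_iff_infix _ _).1 hi)

theorem pv_any_or {A : Type} (l : List A) (p q : A → Bool) :
    l.any (fun x => p x || q x) = (l.any p || l.any q) := by
  induction l with
  | nil => simp
  | cons a l ih => simp [List.any_cons, ih, Bool.or_assoc, Bool.or_left_comm]

-- group recurrences: substring-anywhere = starts-at-head or substring-of-tail
theorem pvP_cons (c : Char) (rest : List Char) : pvP (c :: rest) = (pvPs (c :: rest) || pvP rest) := by
  simp only [pvP, pvPs, pv_isIn_cons]; exact pv_any_or _ _ _
theorem pvN_cons (c : Char) (rest : List Char) : pvN (c :: rest) = (pvNs (c :: rest) || pvN rest) := by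
  simp only [pvN, pvNs, pv_isIn_cons]; exact pv_any_or _ _ _
theorem pvC_cons (c : Char) (rest : List Char) : pvC (c :: rest) = (pvCs (c :: rest) || pvC rest) := by
  simp only [pvC, pvCs, pv_isIn_cons]; exact pv_any_or _ _ _

-- the inner foldl with an arbitrary accumulator = accumulator ||| fold from 0
theorem pv_foldl_or (p : List Char × Nat → Bool) :
    ∀ (ts : List (List Char × Nat)) (m : Nat),
      ts.foldl (fun m t => if p t then m ||| t.2 else m) m =
        m ||| ts.foldl (fun m t => if p t then m ||| t.2 else m) 0 := by
  intro ts
  induction ts with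
  | nil => intro m; simp
  | cons t ts ih =>
    intro m
    simp only [List.foldl_cons]
    rw [ih, ih (if p t then 0 ||| t.2 else 0)]
    cases hp : p t <;> simp [Nat.or_assoc]

-- a fold over a group whose every bit is b yields b iff some term matches
theorem pv_hit_const (p : List Char × Nat → Bool) (b : Nat) :
    ∀ (ts : List (List Char × Nat)), (∀ t ∈ ts, t.2 = b) →
      ts.foldl (fun m t => if p t then m ||| t.2 else m) 0 =
        if ts.any p then b else 0 := by
  intro ts
  induction ts with
  | nil => intro _; simp
  | cons t ts ih =>
    intro h
    simp only [List.foldl_cons, List.any_cons]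
    rw [pv_foldl_or, ih (fun t ht => h t (List.mem_cons_of_mem _ ht)), h t (List.mem_cons_self ..)]
    by_cases hp : p t = true <;> by_cases ha : ts.any p = true <;> simp [hp, ha]

-- the inner fold at one position, groupwise
theorem pv_hit (s : List Char) :
    pvTerms.foldl (fun m t => if PySem.Chars.startswith s t.1 then m ||| t.2 else m) 0 =
      ((if pvPs s then 1 else 0) ||| (if pvNs s then 2 else 0) ||| (if pvCs s then 4 else 0)) := by
  have hsplit : pvTerms =
      ([("agree".toList, 1), ("yes".toList, 1), ("enthusiastic".toList, 1), ("excited".toList, 1),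
        ("joyful".toList, 1), ("accept".toList, 1)] ++
       [("disagree".toList, 2), ("no".toList, 2), ("protest".toList, 2), ("fear".toList, 2), ("too_".toList, 2)] ++
       [("cautious".toList, 4), ("careful".toList, 4), ("maybe".toList, 4), ("consider".toList, 4)]) := rfl
  rw [hsplit, List.foldl_append, List.foldl_append]
  rw [pv_hit_const _ 1 _ (by decide), pv_foldl_or, pv_foldl_or,
      pv_hit_const _ 2 _ (by decide), pv_hit_const _ 4 _ (by decide)]
  have e1 : ([("agree".toList, 1), ("yes".toList, 1), ("enthusiastic".toList, 1), ("excited".toList, 1),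
        ("joyful".toList, 1), ("accept".toList, 1)].any (fun t => PySem.Chars.startswith s t.1)) = pvPs s := rfl
  have e2 : ([("disagree".toList, 2), ("no".toList, 2), ("protest".toList, 2), ("fear".toList, 2),
        ("too_".toList, 2)].any (fun t => PySem.Chars.startswith s t.1)) = pvNs s := rfl
  have e3 : ([("cautious".toList, 4), ("careful".toList, 4), ("maybe".toList, 4),
        ("consider".toList, 4)].any (fun t => PySem.Chars.startswith s t.1)) = pvCs s := rfl
  rw [e1, e2, e3, Nat.or_assoc]

theorem pv_scan_eq : ∀ (d : List Char) (m : Nat),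
    (List.range d.length).foldl
      (fun mask i =>
        pvTerms.foldl (fun m t => if PySem.Chars.startswith (d.drop i) t.1 then m ||| t.2 else m) mask) m
      = m ||| pvG d := by
  intro d
  induction d with
  | nil =>
    intro m
    rw [show pvG [] = 0 from by decide]
    simp
  | cons c rest ih =>
    intro m
    rw [List.length_cons, List.range_succ_eq_map, List.foldl_cons, List.foldl_map]
    simp only [List.drop_succ_cons]
    refine (ih _).trans ?_
    have h2 := pv_foldl_or (fun t => PySem.Chars.startswith (List.drop 0 (c :: rest)) t.1) pvTerms m
    beta_reduce at h2
    rw [h2, pv_hit, List.drop_zero, Nat.or_assoc]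
    congr 1
    rw [pvG, pvG, pvP_cons, pvN_cons, pvC_cons]
    cases pvPs (c :: rest) <;> cases pvNs (c :: rest) <;> cases pvCs (c :: rest) <;>
      cases pvP rest <;> cases pvN rest <;> cases pvC rest <;> decide

-- Str.isIn equals the char-level isIn
theorem pv_isIn_toList (sub s : String) :
    PySem.Str.isIn sub s = PySem.Chars.isIn sub.toList s.toList := by
  rcases h : PySem.Chars.isIn sub.toList s.toList with _ | _
  · rw [PySem.Chars.isIn_eq_false_iff] at h
    rcases hs : PySem.Str.isIn sub s with _ | _
    · rfl
    · exact absurd ((PySem.Str.isIn_iff_infix _ _).1 hs) h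
  · exact (PySem.Str.isIn_iff_infix _ _).2 ((PySem.Chars.isIn_iff_infix _ _).1 h)

theorem pv_key (decision1 decision2 : String) :
    decisions_agree_py decision1 decision2 = decisions_agree_py_alt decision1 decision2 := by
  unfold decisions_agree_py decisions_agree_py_alt pvGroupMask
  simp only []
  rw [pv_scan_eq, pv_scan_eq]
  have hf1 : (fun term => PySem.Str.isIn term (PySem.Str.lower decision1)) =
      (fun t : String => PySem.Chars.isIn t.toList (PySem.Str.lower decision1).toList) :=
    funext (fun t => pv_isIn_toList t _)
  have hf2 : (fun term => PySem.Str.isIn term (PySem.Str.lower decision2)) =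
      (fun t : String => PySem.Chars.isIn t.toList (PySem.Str.lower decision2).toList) :=
    funext (fun t => pv_isIn_toList t _)
  simp only [hf1, hf2, Nat.zero_or]
  show (if (pvP (PySem.Str.lower decision1).toList && pvP (PySem.Str.lower decision2).toList) = true then true
        else if (pvN (PySem.Str.lower decision1).toList && pvN (PySem.Str.lower decision2).toList) = true then true
        else if (pvC (PySem.Str.lower decision1).toList && pvC (PySem.Str.lower decision2).toList) = true then true
        else false) = _
  rw [pvG, pvG]
  generalize pvP (PySem.Str.lower decision1).toList = P1
  generalize pvP (PySem.Str.lower decision2).toList = P2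
  generalize pvN (PySem.Str.lower decision1).toList = N1
  generalize pvN (PySem.Str.lower decision2).toList = N2
  generalize pvC (PySem.Str.lower decision1).toList = C1
  generalize pvC (PySem.Str.lower decision2).toList = C2
  cases P1 <;> cases P2 <;> cases N1 <;> cases N2 <;> cases C1 <;> cases C2 <;> decide

-- ===== VERDICT (by name: the statement is the Claim_ definition above) =====
theorem decisions_agree_py_spec : Claim_equal_decisions_agree_py := by
  intro d1 d2 _
  unfold Spec_decisions_agree_py
  exact pv_key d1 d2
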